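-- pv_equiv track=rewrite | github.com/RicardoAAG/Python | Basico/MCM_(inc).py | extraer
-- ===== SOURCE A (Python) =====
-- def extraer(factores_1,factores_2):
--     factor_a_buscar=1
--     mayor_1=[]
--     mayor_2=[]
--     mayor_ambos=[]
--     if factores_1[-1]>=factores_2[-1]:
--         stop=factores_1[-1]
--     else:
--         stop=factores_2[-1]
--
--     for factor_a_buscar in range(1,stop):
--         factor_a_buscar=factor_a_buscar+1
--         mayor_1=[]
--         mayor_2=[]
--
--         if (factor_a_buscar not in factores_1 and factor_a_buscar not in factores_2)==False:
--             for factor in factores_1: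
--                 if factor_a_buscar==factor:
--                     mayor_1.append(factor)
--             for factor in factores_2:
--                 if factor_a_buscar==factor:
--                     mayor_2.append(factor)
--             if len(mayor_1)>=len(mayor_2):
--                 mayor_ambos.extend(mayor_1)
--             else:
--                 mayor_ambos.extend(mayor_2)
--
--     return(mayor_ambos)
-- ===== SOURCE B (Python) =====
-- def extraer(factores_1, factores_2):
--     if factores_1[-1] >= factores_2[-1]:
--         stop = factores_1[-1]
--     else:
--         stop = factores_2[-1]
--     c1 = {}
--     for x in factores_1:
--         c1[x] = c1.get(x, 0) + 1
--     c2 = {}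
--     for x in factores_2:
--         c2[x] = c2.get(x, 0) + 1
--     out = []
--     for v in sorted(set(factores_1 + factores_2)):
--         if 2 <= v <= stop:
--             out.extend([v] * max(c1.get(v, 0), c2.get(v, 0)))
--     return out
-- ===== Notes on version B (the rewrite author's own statement) =====
-- stated objective: faster
-- what changed: Instead of scanning both whole lists for every integer from 2 to stop, B builds one frequency table per list and makes a single pass over the sorted distinct values present, emitting max(count1,count2) copies of each value in [2,stop].
import Mathlib
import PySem

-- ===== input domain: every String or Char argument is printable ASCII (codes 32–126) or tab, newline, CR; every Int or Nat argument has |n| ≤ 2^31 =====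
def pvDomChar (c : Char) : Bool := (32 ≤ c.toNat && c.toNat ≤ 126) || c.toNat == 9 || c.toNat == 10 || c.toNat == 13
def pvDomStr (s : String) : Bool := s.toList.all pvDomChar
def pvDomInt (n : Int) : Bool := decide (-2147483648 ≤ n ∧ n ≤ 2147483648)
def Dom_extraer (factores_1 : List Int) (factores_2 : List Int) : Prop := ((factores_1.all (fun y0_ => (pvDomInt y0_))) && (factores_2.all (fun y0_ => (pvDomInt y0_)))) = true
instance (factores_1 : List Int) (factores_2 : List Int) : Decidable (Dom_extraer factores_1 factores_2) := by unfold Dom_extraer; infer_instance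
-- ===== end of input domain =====

-- B replaces A's per-integer rescans of both lists (for every value 2..stop) by one
-- frequency table per list and a single pass over the sorted distinct present values.
-- Both programs raise IndexError on an empty argument ([-1]); Pre_ excludes that.

-- ===== PORT A =====
def extraer (factores_1 : List Int) (factores_2 : List Int) : List Int :=
  let stop : Int :=
    if PySem.List.pyGetD factores_1 (-1) 0 ≥ PySem.List.pyGetD factores_2 (-1) 0
    then PySem.List.pyGetD factores_1 (-1) 0
    else PySem.List.pyGetD factores_2 (-1) 0
  (PySem.List.pyRange 1 stop 1).foldl (fun mayor_ambos fa0 =>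
    let factor_a_buscar := fa0 + 1
    let mayor_1 : List Int := []
    let mayor_2 : List Int := []
    if ((!(factores_1.contains factor_a_buscar) && !(factores_2.contains factor_a_buscar)) == false) then
      let mayor_1 := factores_1.foldl (fun m factor => if factor_a_buscar == factor then m ++ [factor] else m) mayor_1
      let mayor_2 := factores_2.foldl (fun m factor => if factor_a_buscar == factor then m ++ [factor] else m) mayor_2
      if mayor_1.length ≥ mayor_2.length then mayor_ambos ++ mayor_1 else mayor_ambos ++ mayor_2
    else mayor_ambos) []

-- ===== PORT B =====
def extraer_alt (factores_1 : List Int) (factores_2 : List Int) : List Int :=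
  let stop : Int :=
    if PySem.List.pyGetD factores_1 (-1) 0 ≥ PySem.List.pyGetD factores_2 (-1) 0
    then PySem.List.pyGetD factores_1 (-1) 0
    else PySem.List.pyGetD factores_2 (-1) 0
  let c1 : PySem.Dict Int Int := factores_1.foldl (fun d x => d.insert x (d.getD x 0 + 1)) PySem.Dict.empty
  let c2 : PySem.Dict Int Int := factores_2.foldl (fun d x => d.insert x (d.getD x 0 + 1)) PySem.Dict.empty
  (PySem.List.sorted (PySem.Set.ofList (factores_1 ++ factores_2)) (fun v => v) false).foldl
    (fun out v =>
      if 2 ≤ v ∧ v ≤ stop then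
        out ++ PySem.List.pyRepeat [v] (max (c1.getD v 0) (c2.getD v 0))
      else out) []

-- ===== PRECONDITION & SPEC =====
-- Pre_: both input lists nonempty — on an empty list A (and B) raises IndexError at `[-1]`.
def Pre_extraer (factores_1 : List Int) (factores_2 : List Int) : Prop :=
  factores_1 ≠ [] ∧ factores_2 ≠ []
instance (factores_1 : List Int) (factores_2 : List Int) : Decidable (Pre_extraer factores_1 factores_2) := by unfold Pre_extraer; infer_instance
def pvWitness_extraer : List Int × List Int := ([2, 2, 3], [2, 3, 3, 5])

def Spec_extraer (factores_1 : List Int) (factores_2 : List Int) (out : List Int) : Prop := out = extraer_alt factores_1 factores_2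
instance (factores_1 : List Int) (factores_2 : List Int) (out : List Int) : Decidable (Spec_extraer factores_1 factores_2 out) := by unfold Spec_extraer; infer_instance

-- ===== CLAIM (what is proved, stated in full; the proofs are below) =====
def Claim_equal_extraer : Prop := ∀ (factores_1 : List Int) (factores_2 : List Int), Dom_extraer factores_1 factores_2 → Pre_extraer factores_1 factores_2 → Spec_extraer factores_1 factores_2 (extraer factores_1 factores_2)

-- ===== LEMMAS AND PROOFS =====

-- the common "max count" payload: copies of v, as many as the larger count
def pvG (f1 f2 : List Int) (v : Int) : List Int :=
  List.replicate (max (f1.count v) (f2.count v)) v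

-- the inner Python loop collects exactly count-many copies of v
theorem pv_inner_loop (l : List Int) (v : Int) (acc : List Int) :
    l.foldl (fun m factor => if v == factor then m ++ [factor] else m) acc
      = acc ++ List.replicate (l.count v) v := by
  induction l generalizing acc with
  | nil => simp
  | cons x t ih =>
    rw [List.foldl_cons]
    by_cases h : v = x
    · rw [if_pos (by simp [h]), ih]
      subst h
      rw [List.count_cons_self, List.replicate_succ, List.append_assoc]
      simp
    · rw [if_neg (by simp [h]), ih]
      simp [List.count_cons]
      omega

-- flatMap with a guarded body = flatMap over the filtered list
theorem pv_flatMap_ite {α : Type} (p : α → Prop) [DecidablePred p] (g : α → List Int) (l : List α) :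
    l.flatMap (fun x => if p x then g x else []) = (l.filter (fun x => decide (p x))).flatMap g := by
  induction l with
  | nil => rfl
  | cons x t ih => by_cases h : p x <;> simp [h, ih]

-- strictly increasing Int lists with the same members are equal
theorem pv_sorted_ext (l1 : List Int) : ∀ (l2 : List Int),
    l1.Pairwise (· < ·) → l2.Pairwise (· < ·) → (∀ x, x ∈ l1 ↔ x ∈ l2) → l1 = l2 := by
  induction l1 with
  | nil =>
    intro l2 _ _ hm
    cases l2 with
    | nil => rfl
    | cons b t2 => exact absurd ((hm b).2 (by simp)) (by simp)
  | cons a t1 ih =>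
    intro l2 h1 h2 hm
    cases l2 with
    | nil => exact absurd ((hm a).1 (by simp)) (by simp)
    | cons b t2 =>
      have ha1 : ∀ x ∈ t1, a < x := fun x hx => (List.pairwise_cons.1 h1).1 x hx
      have hb2 : ∀ x ∈ t2, b < x := fun x hx => (List.pairwise_cons.1 h2).1 x hx
      have hab : a = b := by
        have h₁ : a ∈ b :: t2 := (hm a).1 (by simp)
        have h₂ : b ∈ a :: t1 := (hm b).2 (by simp)
        rcases List.mem_cons.1 h₁ with h | h
        · exact h
        · rcases List.mem_cons.1 h₂ with h' | h'
          · exact h'.symm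
          · exact absurd (lt_trans (hb2 a h) (ha1 b h')) (lt_irrefl b)
      subst hab
      have ht : ∀ x, x ∈ t1 ↔ x ∈ t2 := by
        intro x
        constructor
        · intro hx
          have hc := (hm x).1 (List.mem_cons_of_mem _ hx)
          rcases List.mem_cons.1 hc with h | h
          · exact absurd (h ▸ ha1 x hx) (lt_irrefl a)
          · exact h
        · intro hx
          have hc := (hm x).2 (List.mem_cons_of_mem _ hx)
          rcases List.mem_cons.1 hc with h | h
          · exact absurd (h ▸ hb2 x hx) (lt_irrefl a)
          · exact h
      exact congrArg (a :: ·) (ih t2 (List.pairwise_cons.1 h1).2 (List.pairwise_cons.1 h2).2 ht)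

-- a foldl whose step appends g x is init ++ flatMap g
theorem pv_foldl_step {α : Type} (body : List Int → α → List Int) (g : α → List Int)
    (h : ∀ acc x, body acc x = acc ++ g x) :
    ∀ (l : List α) (init : List Int), l.foldl body init = init ++ l.flatMap g := by
  intro l
  induction l with
  | nil => intro init; simp
  | cons x t ih => intro init; rw [List.foldl_cons, h, ih, List.append_assoc]; simp

-- one step of A's outer loop produces exactly pvG of the searched value
theorem pv_A_step (f1 f2 : List Int) (acc : List Int) (v0 : Int) :
    (if ((!(f1.contains (v0 + 1)) && !(f2.contains (v0 + 1))) == false) then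
       let m1 := f1.foldl (fun m factor => if v0 + 1 == factor then m ++ [factor] else m) ([] : List Int)
       let m2 := f2.foldl (fun m factor => if v0 + 1 == factor then m ++ [factor] else m) ([] : List Int)
       if m1.length ≥ m2.length then acc ++ m1 else acc ++ m2
     else acc) = acc ++ pvG f1 f2 (v0 + 1) := by
  simp only [pv_inner_loop, List.nil_append, List.length_replicate, pvG]
  by_cases hm : ((v0 + 1) ∈ f1 ∨ (v0 + 1) ∈ f2)
  · rw [if_pos (by simp; tauto)]
    by_cases hl : f2.count (v0 + 1) ≤ f1.count (v0 + 1)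
    · rw [if_pos hl, max_eq_left hl]
    · rw [if_neg hl, max_eq_right (by omega)]
  · rw [if_neg (by simp; tauto)]
    rw [not_or] at hm
    simp [List.count_eq_zero_of_not_mem hm.1, List.count_eq_zero_of_not_mem hm.2]

-- A's value: flatMap of pvG over the integers 2..stop (values absent from both lists contribute [])
theorem pv_A_eq (f1 f2 : List Int) :
    extraer f1 f2
      = (PySem.List.pyRange 1 (
          if PySem.List.pyGetD f1 (-1) 0 ≥ PySem.List.pyGetD f2 (-1) 0
          then PySem.List.pyGetD f1 (-1) 0 else PySem.List.pyGetD f2 (-1) 0) 1).flatMap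
          (fun v0 => pvG f1 f2 (v0 + 1)) := by
  unfold extraer
  exact (pv_foldl_step _ (fun v0 => pvG f1 f2 (v0 + 1))
    (fun acc v0 => pv_A_step f1 f2 acc v0) _ []).trans (List.nil_append _)

theorem pv_B_eq (f1 f2 : List Int) :
    extraer_alt f1 f2
      = ((PySem.List.sorted (PySem.Set.ofList (f1 ++ f2)) (fun v => v) false).filter
          (fun v => decide (2 ≤ v ∧ v ≤ (
            if PySem.List.pyGetD f1 (-1) 0 ≥ PySem.List.pyGetD f2 (-1) 0
            then PySem.List.pyGetD f1 (-1) 0 else PySem.List.pyGetD f2 (-1) 0)))).flatMap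
          (pvG f1 f2) := by
  unfold extraer_alt
  refine ((pv_foldl_step _
      (fun v => if 2 ≤ v ∧ v ≤ (
        if PySem.List.pyGetD f1 (-1) 0 ≥ PySem.List.pyGetD f2 (-1) 0
        then PySem.List.pyGetD f1 (-1) 0 else PySem.List.pyGetD f2 (-1) 0)
       then pvG f1 f2 v else []) ?_ _ []).trans ?_)
  · intro acc v
    by_cases hp : 2 ≤ v ∧ v ≤ (
      if PySem.List.pyGetD f1 (-1) 0 ≥ PySem.List.pyGetD f2 (-1) 0
      then PySem.List.pyGetD f1 (-1) 0 else PySem.List.pyGetD f2 (-1) 0)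
    · simp only [if_pos hp]
      congr 1
      rw [PySem.List.pyRepeat_singleton]
      unfold pvG
      rw [PySem.Dict.getD_foldl_insert_add_one, PySem.Dict.getD_foldl_insert_add_one]
      simp
      omega
    · simp only [if_neg hp, List.append_nil]
  · rw [List.nil_append, pv_flatMap_ite]

-- flatMap equals flatMap over the filtered list when g vanishes off the filter
theorem pv_flatMap_filter_of_nil (p : Int → Prop) [DecidablePred p] (g : Int → List Int)
    (h : ∀ v, ¬ p v → g v = []) (l : List Int) :
    l.flatMap g = (l.filter (fun v => decide (p v))).flatMap g := by
  induction l with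
  | nil => rfl
  | cons x t ih =>
    by_cases hx : p x
    · simp [hx, ih]
    · simp [hx, ih, h x hx]

-- the main bridge: A's range-driven flatMap equals B's key-driven flatMap
theorem pv_main (f1 f2 : List Int) (stop : Int) :
    (PySem.List.pyRange 1 stop 1).flatMap (fun v0 => pvG f1 f2 (v0 + 1))
      = ((PySem.List.sorted (PySem.Set.ofList (f1 ++ f2)) (fun v => v) false).filter
          (fun v => decide (2 ≤ v ∧ v ≤ stop))).flatMap (pvG f1 f2) := by
  have hshift : (PySem.List.pyRange 1 stop 1).flatMap (fun v0 => pvG f1 f2 (v0 + 1))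
      = (PySem.List.pyRange 2 (stop + 1) 1).flatMap (pvG f1 f2) := by
    rw [PySem.List.pyRange_one 1 stop, PySem.List.pyRange_one 2 (stop + 1)]
    have he : stop + 1 - 2 = stop - 1 := by ring
    rw [he, List.flatMap_map, List.flatMap_map]
    apply List.flatMap_congr
    intro k _
    congr 1
    omega
  rw [hshift,
    pv_flatMap_filter_of_nil (fun v => v ∈ f1 ∨ v ∈ f2) (pvG f1 f2)
      (by
        intro v hv
        rw [not_or] at hv
        simp [pvG, List.count_eq_zero_of_not_mem hv.1, List.count_eq_zero_of_not_mem hv.2])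
      (PySem.List.pyRange 2 (stop + 1) 1)]
  congr 1
  apply pv_sorted_ext
  · exact List.Pairwise.filter _ (PySem.List.pairwise_lt_pyRange_one 2 (stop + 1))
  · exact List.Pairwise.filter _ (PySem.List.sorted_ofList_pairwise_lt (f1 ++ f2))
  · intro x
    simp only [List.mem_filter, PySem.List.mem_pyRange_one, PySem.List.mem_sorted,
      PySem.Set.mem_ofList, List.mem_append, decide_eq_true_eq]
    constructor
    · rintro ⟨⟨h2, hlt⟩, hm⟩
      exact ⟨hm, h2, by omega⟩
    · rintro ⟨hm, h2, hle⟩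
      exact ⟨⟨h2, by omega⟩, hm⟩

-- ===== VERDICT (by name: the statement is the Claim_ definition above) =====
theorem extraer_spec : Claim_equal_extraer := by
  intro f1 f2 _ _
  unfold Spec_extraer
  rw [pv_A_eq, pv_B_eq]
  exact pv_main f1 f2 _
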